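-- pv_equiv track=rewrite | github.com/ShubhamKumaR-96/DSA_Leetcode | carryForward/closetMinMax.py | findClosetMinMax
-- ===== SOURCE A (Python) =====
-- def findClosetMinMax(A):
--     n=len(A)
--
--     min_val=min(A)
--     max_val=max(A)
--     ans=n
--
--     if min_val==max_val:
--         return 1
--
--     for i in range(n):
--         if A[i]==min_val:
--             for j in range(i+1,n):
--                 if A[j]==max_val:
--                    ans=min(ans,j-i+1)
--                    break
--
--         if A[i]==max_val:
--             for j in range(i+1,n):
--                 if A[j]==min_val:
--                    ans=min(ans,j-i+1)
--                    break
--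
--     return ans
-- ===== SOURCE B (Python) =====
-- def findClosetMinMax(A):
--     mn = min(A)
--     mx = max(A)
--     if mn == mx:
--         return 1
--     ans = len(A)
--     last_mn = None
--     last_mx = None
--     for k, x in enumerate(A):
--         if x == mn:
--             if last_mx is not None:
--                 ans = min(ans, k - last_mx + 1)
--             last_mn = k
--         elif x == mx:
--             if last_mn is not None:
--                 ans = min(ans, k - last_mn + 1)
--             last_mx = k
--     return ans
-- ===== Notes on version B (the rewrite author's own statement) =====
-- stated objective: faster
-- what changed: Replaced A's nested scan (for each extreme occurrence, rescan the suffix for the other extreme) by a single pass that tracks the last seen min/max index and updates the answer on the fly.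
import Mathlib
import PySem

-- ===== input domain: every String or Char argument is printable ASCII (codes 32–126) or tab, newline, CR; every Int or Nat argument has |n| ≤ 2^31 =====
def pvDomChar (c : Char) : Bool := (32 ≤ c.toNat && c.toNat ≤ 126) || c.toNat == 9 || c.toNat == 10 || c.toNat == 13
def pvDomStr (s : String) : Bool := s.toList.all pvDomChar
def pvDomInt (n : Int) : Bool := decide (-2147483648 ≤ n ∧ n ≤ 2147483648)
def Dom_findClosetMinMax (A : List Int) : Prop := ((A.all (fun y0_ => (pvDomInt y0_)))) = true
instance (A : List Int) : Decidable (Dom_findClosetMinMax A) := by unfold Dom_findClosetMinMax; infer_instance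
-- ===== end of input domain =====

-- B replaces A's quadratic rescans by a single pass tracking the last min/max index (objective: faster).

-- ===== PORT A =====
-- inner loop 'for j in range(i+1, n): if A[j]==v: ans=min(ans, j-i+1); break'
def pvInnerA (A : List Int) (v : Int) (i : Int) (ans : Int) : List Int → Int
  | [] => ans
  | j :: js => if PySem.List.pyGetD A j 0 = v then min ans (j - i + 1) else pvInnerA A v i ans js

-- one iteration of A's outer loop body (the two sequential 'if's)
def pvBodyA (A : List Int) (minVal maxVal n ans i : Int) : Int :=
  let ans1 := if PySem.List.pyGetD A i 0 = minVal then
      pvInnerA A maxVal i ans (PySem.List.pyRange (i+1) n 1) else ans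
  if PySem.List.pyGetD A i 0 = maxVal then
      pvInnerA A minVal i ans1 (PySem.List.pyRange (i+1) n 1) else ans1

def findClosetMinMax (A : List Int) : Int :=
  let n : Int := A.length
  match PySem.List.min? A (fun x => x), PySem.List.max? A (fun x => x) with
  | some minVal, some maxVal =>
    if minVal = maxVal then 1
    else (PySem.List.pyRange 0 n 1).foldl (pvBodyA A minVal maxVal n) n
  | _, _ => 0  -- unreachable under Pre_: Python's min/max raise ValueError on []

-- ===== PORT B =====
-- one iteration of B's loop: state (ans, last_mn, last_mx), element (k, x)
def pvStepB (mn mx : Int) (st : Int × Option Int × Option Int) (p : Int × Int) :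
    Int × Option Int × Option Int :=
  if p.2 = mn then
    ((match st.2.2 with | some q => min st.1 (p.1 - q + 1) | none => st.1), some p.1, st.2.2)
  else if p.2 = mx then
    ((match st.2.1 with | some q => min st.1 (p.1 - q + 1) | none => st.1), st.2.1, some p.1)
  else st

def findClosetMinMax_alt (A : List Int) : Int :=
  match PySem.List.min? A (fun x => x) with
  | none => 0  -- unreachable under Pre_
  | some mn =>
    match PySem.List.max? A (fun x => x) with
    | none => 0  -- unreachable under Pre_
    | some mx =>
      if mn = mx then 1
      else ((PySem.List.enumerate A 0).foldl (pvStepB mn mx) (((A.length : Int), none, none))).1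

-- ===== PRECONDITION & SPEC =====
-- Pre_ excludes only the empty list, on which Python's min/max raise ValueError.
def Pre_findClosetMinMax (A : List Int) : Prop := A ≠ []
instance (A : List Int) : Decidable (Pre_findClosetMinMax A) := by
  unfold Pre_findClosetMinMax; infer_instance

def pvWitness_findClosetMinMax : List Int := [1, 3, 2]

def Spec_findClosetMinMax (A : List Int) (out : Int) : Prop := out = findClosetMinMax_alt A
instance (A : List Int) (out : Int) : Decidable (Spec_findClosetMinMax A out) := by
  unfold Spec_findClosetMinMax; infer_instance

-- ===== CLAIM (what is proved, stated in full; the proofs are below) =====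
def Claim_equal_findClosetMinMax : Prop :=
  ∀ (A : List Int), Dom_findClosetMinMax A → Pre_findClosetMinMax A →
    Spec_findClosetMinMax A (findClosetMinMax A)

-- ===== LEMMAS AND PROOFS =====

-- w is the width of some window whose two ends carry the values mn and mx
def pvIsPW (A : List Int) (mn mx w : Int) : Prop :=
  ∃ i j : Int, 0 ≤ i ∧ i < j ∧ j < (A.length : Int) ∧
    ((PySem.List.pyGetD A i 0 = mn ∧ PySem.List.pyGetD A j 0 = mx) ∨
     (PySem.List.pyGetD A i 0 = mx ∧ PySem.List.pyGetD A j 0 = mn)) ∧ w = j - i + 1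

theorem pvInnerA_le (A : List Int) (v i : Int) :
    ∀ (js : List Int) (ans : Int), pvInnerA A v i ans js ≤ ans := by
  intro js
  induction js with
  | nil => intro ans; simp [pvInnerA]
  | cons j rest ih =>
    intro ans
    by_cases h : PySem.List.pyGetD A j 0 = v
    · simp [pvInnerA, h]
    · simpa [pvInnerA, h] using ih ans

theorem pvInnerA_le_mem (A : List Int) (v i j : Int) :
    ∀ (js : List Int) (ans : Int), js.Pairwise (· < ·) → j ∈ js →
      PySem.List.pyGetD A j 0 = v → pvInnerA A v i ans js ≤ j - i + 1 := by
  intro js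
  induction js with
  | nil => intro ans _ hj; simp at hj
  | cons j' rest ih =>
    intro ans hp hj hv
    rcases List.pairwise_cons.mp hp with ⟨hlt, hp'⟩
    by_cases h : PySem.List.pyGetD A j' 0 = v
    · have hj'j : j' ≤ j := by
        rcases List.mem_cons.mp hj with hj | hj
        · omega
        · exact le_of_lt (hlt j hj)
      calc pvInnerA A v i ans (j' :: rest) = min ans (j' - i + 1) := by simp [pvInnerA, h]
        _ ≤ j' - i + 1 := min_le_right _ _
        _ ≤ j - i + 1 := by omega
    · have hjr : j ∈ rest := by
        rcases List.mem_cons.mp hj with hj | hj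
        · exact absurd (hj ▸ hv) h
        · exact hj
      simpa [pvInnerA, h] using ih ans hp' hjr hv

theorem pvInnerA_shape (A : List Int) (v i : Int) :
    ∀ (js : List Int) (ans : Int), pvInnerA A v i ans js = ans ∨
      ∃ j ∈ js, PySem.List.pyGetD A j 0 = v ∧ pvInnerA A v i ans js = j - i + 1 := by
  intro js
  induction js with
  | nil => intro ans; left; simp [pvInnerA]
  | cons j' rest ih =>
    intro ans
    by_cases h : PySem.List.pyGetD A j' 0 = v
    · rcases min_cases ans (j' - i + 1) with ⟨hm, _⟩ | ⟨hm, _⟩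
      · left; simp [pvInnerA, h, hm]
      · right; exact ⟨j', by simp, h, by simp [pvInnerA, h, hm]⟩
    · rcases ih ans with h1 | ⟨j, hj, hv, he⟩
      · left; simpa [pvInnerA, h] using h1
      · right; exact ⟨j, by simp [hj], hv, by simpa [pvInnerA, h] using he⟩

theorem pvBodyA_le (A : List Int) (mn mx n ans i : Int) :
    pvBodyA A mn mx n ans i ≤ ans := by
  unfold pvBodyA
  split_ifs with h1 h2 h3 <;>
    simp only [] <;>
    first
      | exact le_trans (pvInnerA_le _ _ _ _ _) (pvInnerA_le _ _ _ _ _)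
      | exact pvInnerA_le _ _ _ _ _
      | exact le_refl _

theorem pvFoldA_le (A : List Int) (mn mx n : Int) :
    ∀ (l : List Int) (ans : Int), l.foldl (pvBodyA A mn mx n) ans ≤ ans := by
  intro l
  induction l with
  | nil => intro ans; simp
  | cons x rest ih =>
    intro ans
    calc (x :: rest).foldl (pvBodyA A mn mx n) ans
        = rest.foldl (pvBodyA A mn mx n) (pvBodyA A mn mx n ans x) := rfl
      _ ≤ pvBodyA A mn mx n ans x := ih _
      _ ≤ ans := pvBodyA_le _ _ _ _ _ _

theorem pvBodyA_le_pair (A : List Int) (mn mx n ans i j : Int) (hne : mn ≠ mx)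
    (hij : i < j) (hjn : j < n)
    (hpair : (PySem.List.pyGetD A i 0 = mn ∧ PySem.List.pyGetD A j 0 = mx) ∨
      (PySem.List.pyGetD A i 0 = mx ∧ PySem.List.pyGetD A j 0 = mn)) :
    pvBodyA A mn mx n ans i ≤ j - i + 1 := by
  have hmem : j ∈ PySem.List.pyRange (i+1) n 1 := PySem.List.mem_pyRange_one.mpr ⟨by omega, hjn⟩
  have hpw := PySem.List.pairwise_lt_pyRange_one (i+1) n
  simp only [pvBodyA]
  rcases hpair with ⟨hi, hj⟩ | ⟨hi, hj⟩
  · have hi' : PySem.List.pyGetD A i 0 ≠ mx := by rw [hi]; exact hne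
    rw [if_neg hi', if_pos hi]
    exact pvInnerA_le_mem A mx i j (PySem.List.pyRange (i+1) n 1) ans hpw hmem hj
  · have hi' : PySem.List.pyGetD A i 0 ≠ mn := by rw [hi]; intro h; exact hne h.symm
    rw [if_pos hi, if_neg hi']
    exact pvInnerA_le_mem A mn i j (PySem.List.pyRange (i+1) n 1) ans hpw hmem hj

theorem pvFoldA_le_pair (A : List Int) (mn mx : Int) (hne : mn ≠ mx) (i j : Int)
    (hi0 : 0 ≤ i) (hij : i < j) (hjn : j < (A.length : Int))
    (hpair : (PySem.List.pyGetD A i 0 = mn ∧ PySem.List.pyGetD A j 0 = mx) ∨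
      (PySem.List.pyGetD A i 0 = mx ∧ PySem.List.pyGetD A j 0 = mn)) :
    ∀ ans, (PySem.List.pyRange 0 (A.length : Int) 1).foldl (pvBodyA A mn mx (A.length : Int)) ans
      ≤ j - i + 1 := by
  intro ans
  set n : Int := (A.length : Int) with hn
  have hin : i < n := by omega
  have hsplit : PySem.List.pyRange 0 n 1 =
      PySem.List.pyRange 0 i 1 ++ (i :: PySem.List.pyRange (i+1) n 1) := by
    rw [PySem.List.pyRange_one_append 0 i n hi0 (by omega), PySem.List.pyRange_one_cons hin]
  rw [hsplit, List.foldl_append]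
  calc (i :: PySem.List.pyRange (i+1) n 1).foldl (pvBodyA A mn mx n)
        ((PySem.List.pyRange 0 i 1).foldl (pvBodyA A mn mx n) ans)
      = (PySem.List.pyRange (i+1) n 1).foldl (pvBodyA A mn mx n)
        (pvBodyA A mn mx n ((PySem.List.pyRange 0 i 1).foldl (pvBodyA A mn mx n) ans) i) := rfl
    _ ≤ pvBodyA A mn mx n ((PySem.List.pyRange 0 i 1).foldl (pvBodyA A mn mx n) ans) i :=
        pvFoldA_le _ _ _ _ _ _
    _ ≤ j - i + 1 := pvBodyA_le_pair A mn mx n _ i j hne hij hjn hpair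

theorem pvBodyA_shape (A : List Int) (mn mx ans a : Int) (ha : 0 ≤ a) :
    pvBodyA A mn mx (A.length : Int) ans a = ans ∨
      pvIsPW A mn mx (pvBodyA A mn mx (A.length : Int) ans a) := by
  set n : Int := (A.length : Int) with hn
  have hshape1 := fun (v ans' : Int) => pvInnerA_shape A v a (PySem.List.pyRange (a+1) n 1) ans'
  simp only [pvBodyA]
  split_ifs with h2 h1 h1
  · -- A[a] = mx and A[a] = mn
    rcases hshape1 mn (pvInnerA A mx a ans (PySem.List.pyRange (a+1) n 1)) with hs | ⟨j, hj, hv, he⟩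
    · rw [hs]
      rcases hshape1 mx ans with hs' | ⟨j, hj, hv, he⟩
      · left; exact hs'
      · right
        rcases PySem.List.mem_pyRange_one.mp hj with ⟨hja, hjn⟩
        exact ⟨a, j, ha, by omega, hjn, Or.inl ⟨h1, hv⟩, he⟩
    · right
      rcases PySem.List.mem_pyRange_one.mp hj with ⟨hja, hjn⟩
      exact ⟨a, j, ha, by omega, hjn, Or.inr ⟨h2, hv⟩, he⟩
  · -- A[a] = mx only
    rcases hshape1 mn ans with hs | ⟨j, hj, hv, he⟩
    · left; exact hs
    · right
      rcases PySem.List.mem_pyRange_one.mp hj with ⟨hja, hjn⟩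
      exact ⟨a, j, ha, by omega, hjn, Or.inr ⟨h2, hv⟩, he⟩
  · -- A[a] = mn only
    rcases hshape1 mx ans with hs | ⟨j, hj, hv, he⟩
    · left; exact hs
    · right
      rcases PySem.List.mem_pyRange_one.mp hj with ⟨hja, hjn⟩
      exact ⟨a, j, ha, by omega, hjn, Or.inl ⟨h1, hv⟩, he⟩
  · left; rfl

theorem pvFoldA_shape (A : List Int) (mn mx : Int) :
    ∀ (fuel : Nat) (a ans : Int), 0 ≤ a → ((A.length : Int) - a).toNat ≤ fuel →
      (PySem.List.pyRange a (A.length : Int) 1).foldl (pvBodyA A mn mx (A.length : Int)) ans = ans ∨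
        pvIsPW A mn mx
          ((PySem.List.pyRange a (A.length : Int) 1).foldl (pvBodyA A mn mx (A.length : Int)) ans) := by
  intro fuel
  induction fuel with
  | zero =>
    intro a ans ha hf
    have : (A.length : Int) ≤ a := by omega
    left; rw [PySem.List.pyRange_one_eq_nil this]; rfl
  | succ f ih =>
    intro a ans ha hf
    by_cases hna : (A.length : Int) ≤ a
    · left; rw [PySem.List.pyRange_one_eq_nil hna]; rfl
    · rw [PySem.List.pyRange_one_cons (by omega : a < (A.length : Int))]
      have step := ih (a+1) (pvBodyA A mn mx (A.length : Int) ans a) (by omega) (by omega)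
      rcases step with hs | hs
      · rw [List.foldl_cons, hs]
        exact pvBodyA_shape A mn mx ans a ha
      · right; rw [List.foldl_cons]; exact hs

-- ===== B-side lemmas =====

theorem pvStepB_le (mn mx : Int) (st : Int × Option Int × Option Int) (p : Int × Int) :
    (pvStepB mn mx st p).1 ≤ st.1 := by
  unfold pvStepB
  split_ifs with h1 h2
  · cases st.2.2 <;> simp
  · cases st.2.1 <;> simp
  · exact le_refl _

theorem pvFoldB_le (mn mx : Int) :
    ∀ (l : List (Int × Int)) (st : Int × Option Int × Option Int),
      (l.foldl (pvStepB mn mx) st).1 ≤ st.1 := by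
  intro l
  induction l with
  | nil => intro st; simp
  | cons p rest ih =>
    intro st
    calc ((p :: rest).foldl (pvStepB mn mx) st).1
        = (rest.foldl (pvStepB mn mx) (pvStepB mn mx st p)).1 := rfl
      _ ≤ (pvStepB mn mx st p).1 := ih _
      _ ≤ st.1 := pvStepB_le _ _ _ _

theorem pvFoldB_shape (A : List Int) (mn mx : Int) :
    ∀ (l : List (Int × Int)) (st : Int × Option Int × Option Int),
      (∀ p ∈ l, 0 ≤ p.1 ∧ p.1 < (A.length : Int) ∧ PySem.List.pyGetD A p.1 0 = p.2) →
      l.Pairwise (fun p q => p.1 < q.1) →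
      (∀ q, st.2.1 = some q → 0 ≤ q ∧ q < (A.length : Int) ∧ PySem.List.pyGetD A q 0 = mn ∧
        ∀ p ∈ l, q < p.1) →
      (∀ q, st.2.2 = some q → 0 ≤ q ∧ q < (A.length : Int) ∧ PySem.List.pyGetD A q 0 = mx ∧
        ∀ p ∈ l, q < p.1) →
      (l.foldl (pvStepB mn mx) st).1 = st.1 ∨ pvIsPW A mn mx (l.foldl (pvStepB mn mx) st).1 := by
  intro l
  induction l with
  | nil => intro st _ _ _ _; left; rfl
  | cons p rest ih =>
    intro st hmem hsort hmn hmx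
    rcases List.pairwise_cons.mp hsort with ⟨hlt, hsort'⟩
    obtain ⟨hp0, hpn, hpv⟩ := hmem p (by simp)
    have hmem' : ∀ r ∈ rest, 0 ≤ r.1 ∧ r.1 < (A.length : Int) ∧ PySem.List.pyGetD A r.1 0 = r.2 :=
      fun r hr => hmem r (by simp [hr])
    by_cases h1 : p.2 = mn
    · have hAp : PySem.List.pyGetD A p.1 0 = mn := by rw [hpv, h1]
      cases hq : st.2.2 with
      | none =>
        have hst' : pvStepB mn mx st p = (st.1, some p.1, st.2.2) := by
          unfold pvStepB; rw [if_pos h1, hq]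
        rw [List.foldl_cons, hst']
        exact ih (st.1, some p.1, st.2.2)
          hmem' hsort'
          (by intro q hq'
              have hq'' : some p.1 = some q := hq'
              injection hq'' with hq''; subst hq''
              exact ⟨hp0, hpn, hAp, fun r hr => hlt r hr⟩)
          (by intro q hq'
              have hq'' : st.2.2 = some q := hq'
              rw [hq] at hq''; exact absurd hq'' (by simp))
      | some q0 =>
        obtain ⟨hq0, hq0n, hq0v, hq0lt⟩ := hmx q0 hq
        have hqp : q0 < p.1 := hq0lt p (by simp)
        have hst' : pvStepB mn mx st p = (min st.1 (p.1 - q0 + 1), some p.1, st.2.2) := by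
          unfold pvStepB; rw [if_pos h1, hq]
        rw [List.foldl_cons, hst']
        have hrec := ih (min st.1 (p.1 - q0 + 1), some p.1, st.2.2)
          hmem' hsort'
          (by intro q hq'
              have hq'' : some p.1 = some q := hq'
              injection hq'' with hq''; subst hq''
              exact ⟨hp0, hpn, hAp, fun r hr => hlt r hr⟩)
          (by intro q hq'
              have hq'' : st.2.2 = some q := hq'
              rw [hq] at hq''; injection hq'' with hq''; subst hq''
              exact ⟨hq0, hq0n, hq0v, fun r hr => lt_trans hqp (hlt r hr)⟩)
        rcases hrec with hrec | hrec
        · rcases min_cases st.1 (p.1 - q0 + 1) with ⟨hm, _⟩ | ⟨hm, _⟩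
          · left; rw [hrec]; simpa using hm
          · right; rw [hrec]; simp only [hm]
            exact ⟨q0, p.1, hq0, hqp, hpn, Or.inr ⟨hq0v, hAp⟩, rfl⟩
        · right; exact hrec
    · by_cases h2 : p.2 = mx
      · have hAp : PySem.List.pyGetD A p.1 0 = mx := by rw [hpv, h2]
        cases hq : st.2.1 with
        | none =>
          have hst' : pvStepB mn mx st p = (st.1, st.2.1, some p.1) := by
            unfold pvStepB; rw [if_neg h1, if_pos h2, hq]
          rw [List.foldl_cons, hst']
          exact ih (st.1, st.2.1, some p.1)
            hmem' hsort'
            (by intro q hq'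
                have hq'' : st.2.1 = some q := hq'
                rw [hq] at hq''; exact absurd hq'' (by simp))
            (by intro q hq'
                have hq'' : some p.1 = some q := hq'
                injection hq'' with hq''; subst hq''
                exact ⟨hp0, hpn, hAp, fun r hr => hlt r hr⟩)
        | some q0 =>
          obtain ⟨hq0, hq0n, hq0v, hq0lt⟩ := hmn q0 hq
          have hqp : q0 < p.1 := hq0lt p (by simp)
          have hst' : pvStepB mn mx st p = (min st.1 (p.1 - q0 + 1), st.2.1, some p.1) := by
            unfold pvStepB; rw [if_neg h1, if_pos h2, hq]
          rw [List.foldl_cons, hst']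
          have hrec := ih (min st.1 (p.1 - q0 + 1), st.2.1, some p.1)
            hmem' hsort'
            (by intro q hq'
                have hq'' : st.2.1 = some q := hq'
                rw [hq] at hq''; injection hq'' with hq''; subst hq''
                exact ⟨hq0, hq0n, hq0v, fun r hr => lt_trans hqp (hlt r hr)⟩)
            (by intro q hq'
                have hq'' : some p.1 = some q := hq'
                injection hq'' with hq''; subst hq''
                exact ⟨hp0, hpn, hAp, fun r hr => hlt r hr⟩)
          rcases hrec with hrec | hrec
          · rcases min_cases st.1 (p.1 - q0 + 1) with ⟨hm, _⟩ | ⟨hm, _⟩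
            · left; rw [hrec]; simpa using hm
            · right; rw [hrec]; simp only [hm]
              exact ⟨q0, p.1, hq0, hqp, hpn, Or.inl ⟨hq0v, hAp⟩, rfl⟩
          · right; exact hrec
      · have hst' : pvStepB mn mx st p = st := by
          unfold pvStepB; rw [if_neg h1, if_neg h2]
        rw [List.foldl_cons, hst']
        exact ih st hmem' hsort'
          (fun q hq' => let ⟨a, b, c, d⟩ := hmn q hq'; ⟨a, b, c, fun r hr => d r (by simp [hr])⟩)
          (fun q hq' => let ⟨a, b, c, d⟩ := hmx q hq'; ⟨a, b, c, fun r hr => d r (by simp [hr])⟩)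

-- B reaches every (min at i, max at j) window: version with min on the left
theorem pvFoldB_le_mnmx (A : List Int) (mn mx : Int) (hne : mn ≠ mx) (i j : Int)
    (hij : i < j) (hiv : PySem.List.pyGetD A i 0 = mn) (hjv : PySem.List.pyGetD A j 0 = mx) :
    ∀ (l : List (Int × Int)) (st : Int × Option Int × Option Int),
      (∀ p ∈ l, PySem.List.pyGetD A p.1 0 = p.2) →
      l.Pairwise (fun p q => p.1 < q.1) →
      (j, mx) ∈ l →
      ((i, mn) ∈ l ∨
        ((∃ q, st.2.1 = some q ∧ i ≤ q ∧ PySem.List.pyGetD A q 0 = mn) ∧ ∀ p ∈ l, i < p.1)) →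
      (l.foldl (pvStepB mn mx) st).1 ≤ j - i + 1 := by
  intro l
  induction l with
  | nil => intro st _ _ hj _; simp at hj
  | cons p rest ih =>
    intro st hmem hsort hj hi
    rcases List.pairwise_cons.mp hsort with ⟨hlt, hsort'⟩
    have hpv := hmem p (by simp)
    by_cases hpj : p.1 = j
    · -- the step at j fires with the recorded last min
    -- first: Hi cannot be membership of (i, mn) here
      have hiq : (∃ q, st.2.1 = some q ∧ i ≤ q ∧ PySem.List.pyGetD A q 0 = mn) := by
        rcases hi with hi | hi
        · rcases List.mem_cons.mp hi with hi | hi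
          · exfalso; have : p = (i, mn) := hi ▸ rfl
            rw [this] at hpj; simp at hpj; omega
          · exfalso; have := hlt (i, mn) hi; simp [hpj] at this; omega
        · exact hi.1
      obtain ⟨q, hq, hiq', hqv⟩ := hiq
      have hp2 : p.2 = mx := by rw [← hpv, hpj, hjv]
      have hp2' : p.2 ≠ mn := by rw [hp2]; intro h; exact hne h.symm
      have hst' : pvStepB mn mx st p = (min st.1 (p.1 - q + 1), st.2.1, some p.1) := by
        unfold pvStepB; rw [if_neg hp2', if_pos hp2, hq]
      rw [List.foldl_cons, hst']
      calc (rest.foldl (pvStepB mn mx) (min st.1 (p.1 - q + 1), st.2.1, some p.1)).1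
          ≤ min st.1 (p.1 - q + 1) := pvFoldB_le _ _ _ _
        _ ≤ p.1 - q + 1 := min_le_right _ _
        _ ≤ j - i + 1 := by omega
    · have hjr : (j, mx) ∈ rest := by
        rcases List.mem_cons.mp hj with hj | hj
        · exact absurd (by rw [← hj]) hpj
        · exact hj
      rw [List.foldl_cons]
      apply ih (pvStepB mn mx st p) (fun r hr => hmem r (by simp [hr])) hsort' hjr
      -- re-establish the tracking hypothesis
      by_cases hpi : p.1 = i
      · right
        have hp2 : p.2 = mn := by rw [← hpv, hpi, hiv]
        constructor
        · refine ⟨p.1, ?_, by omega, by rw [hpv, hp2]⟩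
          unfold pvStepB; rw [if_pos hp2]
        · intro r hr; have := hlt r hr; omega
      · rcases hi with hi | hi
        · left
          rcases List.mem_cons.mp hi with hi | hi
          · exact absurd (by rw [← hi]) hpi
          · exact hi
        · right
          obtain ⟨⟨q, hq, hiq', hqv⟩, hall⟩ := hi
          have hip : i < p.1 := hall p (by simp)
          constructor
          · by_cases h1 : p.2 = mn
            · exact ⟨p.1, by unfold pvStepB; rw [if_pos h1], by omega, by rw [hpv, h1]⟩
            · by_cases h2 : p.2 = mx
              · exact ⟨q, by unfold pvStepB; rw [if_neg h1, if_pos h2]; exact hq, hiq', hqv⟩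
              · exact ⟨q, by unfold pvStepB; rw [if_neg h1, if_neg h2]; exact hq, hiq', hqv⟩
          · intro r hr; exact hall r (by simp [hr])

-- symmetric version: max on the left, min on the right
theorem pvFoldB_le_mxmn (A : List Int) (mn mx : Int) (hne : mn ≠ mx) (i j : Int)
    (hij : i < j) (hiv : PySem.List.pyGetD A i 0 = mx) (hjv : PySem.List.pyGetD A j 0 = mn) :
    ∀ (l : List (Int × Int)) (st : Int × Option Int × Option Int),
      (∀ p ∈ l, PySem.List.pyGetD A p.1 0 = p.2) →
      l.Pairwise (fun p q => p.1 < q.1) →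
      (j, mn) ∈ l →
      ((i, mx) ∈ l ∨
        ((∃ q, st.2.2 = some q ∧ i ≤ q ∧ PySem.List.pyGetD A q 0 = mx) ∧ ∀ p ∈ l, i < p.1)) →
      (l.foldl (pvStepB mn mx) st).1 ≤ j - i + 1 := by
  intro l
  induction l with
  | nil => intro st _ _ hj _; simp at hj
  | cons p rest ih =>
    intro st hmem hsort hj hi
    rcases List.pairwise_cons.mp hsort with ⟨hlt, hsort'⟩
    have hpv := hmem p (by simp)
    by_cases hpj : p.1 = j
    · have hiq : (∃ q, st.2.2 = some q ∧ i ≤ q ∧ PySem.List.pyGetD A q 0 = mx) := by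
        rcases hi with hi | hi
        · rcases List.mem_cons.mp hi with hi | hi
          · exfalso; have : p = (i, mx) := hi ▸ rfl
            rw [this] at hpj; simp at hpj; omega
          · exfalso; have := hlt (i, mx) hi; simp [hpj] at this; omega
        · exact hi.1
      obtain ⟨q, hq, hiq', hqv⟩ := hiq
      have hp2 : p.2 = mn := by rw [← hpv, hpj, hjv]
      have hst' : pvStepB mn mx st p = (min st.1 (p.1 - q + 1), some p.1, st.2.2) := by
        unfold pvStepB; rw [if_pos hp2, hq]
      rw [List.foldl_cons, hst']
      calc (rest.foldl (pvStepB mn mx) (min st.1 (p.1 - q + 1), some p.1, st.2.2)).1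
          ≤ min st.1 (p.1 - q + 1) := pvFoldB_le _ _ _ _
        _ ≤ p.1 - q + 1 := min_le_right _ _
        _ ≤ j - i + 1 := by omega
    · have hjr : (j, mn) ∈ rest := by
        rcases List.mem_cons.mp hj with hj | hj
        · exact absurd (by rw [← hj]) hpj
        · exact hj
      rw [List.foldl_cons]
      apply ih (pvStepB mn mx st p) (fun r hr => hmem r (by simp [hr])) hsort' hjr
      by_cases hpi : p.1 = i
      · right
        have hp2 : p.2 = mx := by rw [← hpv, hpi, hiv]
        have hp2' : p.2 ≠ mn := by rw [hp2]; intro h; exact hne h.symm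
        constructor
        · refine ⟨p.1, ?_, by omega, by rw [hpv, hp2]⟩
          unfold pvStepB; rw [if_neg hp2', if_pos hp2]
        · intro r hr; have := hlt r hr; omega
      · rcases hi with hi | hi
        · left
          rcases List.mem_cons.mp hi with hi | hi
          · exact absurd (by rw [← hi]) hpi
          · exact hi
        · right
          obtain ⟨⟨q, hq, hiq', hqv⟩, hall⟩ := hi
          have hip : i < p.1 := hall p (by simp)
          constructor
          · by_cases h1 : p.2 = mn
            · exact ⟨q, by unfold pvStepB; rw [if_pos h1]; exact hq, hiq', hqv⟩
            · by_cases h2 : p.2 = mx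
              · exact ⟨p.1, by unfold pvStepB; rw [if_neg h1, if_pos h2], by omega, by rw [hpv, h2]⟩
              · exact ⟨q, by unfold pvStepB; rw [if_neg h1, if_neg h2]; exact hq, hiq', hqv⟩
          · intro r hr; exact hall r (by simp [hr])

-- ===== enumerate facts =====

theorem pvGetD_cons_succ (x : Int) (xs : List Int) (i : Int) (hi : 0 ≤ i) :
    PySem.List.pyGetD (x :: xs) (i + 1) 0 = PySem.List.pyGetD xs i 0 := by
  have h1 : i = ((i.toNat : Nat) : Int) := by omega
  rw [h1]
  unfold PySem.List.pyGetD
  rw [PySem.List.pyGet?_cons_succ]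

theorem pvEnum_mem (L : List Int) :
    ∀ (s : Int) (p : Int × Int), p ∈ PySem.List.enumerate L s →
      s ≤ p.1 ∧ p.1 < s + (L.length : Int) ∧ PySem.List.pyGetD L (p.1 - s) 0 = p.2 := by
  induction L with
  | nil => intro s p hp; simp [PySem.List.enumerate] at hp
  | cons x xs ih =>
    intro s p hp
    rw [PySem.List.enumerate_cons] at hp
    rcases List.mem_cons.mp hp with hp | hp
    · subst hp
      refine ⟨le_refl _, by simp, ?_⟩
      simp [PySem.List.pyGetD_zero_cons]
    · obtain ⟨h1, h2, h3⟩ := ih (s+1) p hp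
      refine ⟨by omega, by simp; omega, ?_⟩
      have heq : p.1 - s = (p.1 - (s+1)) + 1 := by omega
      rw [heq, pvGetD_cons_succ _ _ _ (by omega)]
      exact h3

theorem pvEnum_mem_of (L : List Int) :
    ∀ (s k : Int), s ≤ k → k < s + (L.length : Int) →
      (k, PySem.List.pyGetD L (k - s) 0) ∈ PySem.List.enumerate L s := by
  induction L with
  | nil => intro s k h1 h2; simp at h2; omega
  | cons x xs ih =>
    intro s k h1 h2
    rw [PySem.List.enumerate_cons]
    by_cases hk : k = s
    · subst hk
      have hx : PySem.List.pyGetD (x :: xs) (k - k) 0 = x := by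
        rw [sub_self]; exact PySem.List.pyGetD_zero_cons x xs 0
      rw [hx]; exact List.mem_cons_self
    · refine List.mem_cons_of_mem _ ?_
      have hrec := ih (s+1) k (by omega) (by simp at h2; omega)
      have heq : k - s = (k - (s+1)) + 1 := by omega
      rw [heq, pvGetD_cons_succ _ _ _ (by omega)]
      exact hrec

theorem pvEnum_sorted (L : List Int) :
    ∀ (s : Int), (PySem.List.enumerate L s).Pairwise (fun p q => p.1 < q.1) := by
  induction L with
  | nil => intro s; simp [PySem.List.enumerate]
  | cons x xs ih =>
    intro s
    rw [PySem.List.enumerate_cons]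
    refine List.pairwise_cons.mpr ⟨?_, ih (s+1)⟩
    intro p hp
    have := (pvEnum_mem xs (s+1) p hp).1
    simp only []
    omega

-- ===== main assembly =====

theorem pvMain (A : List Int) (h : A ≠ []) : findClosetMinMax A = findClosetMinMax_alt A := by
  obtain ⟨mn, hmn⟩ : ∃ mn, PySem.List.min? A (fun x => x) = some mn := by
    cases hm : PySem.List.min? A (fun x => x) with
    | none => exact absurd ((PySem.List.min?_eq_none_iff A _).mp hm) h
    | some m => exact ⟨m, rfl⟩
  obtain ⟨mx, hmx⟩ : ∃ mx, PySem.List.max? A (fun x => x) = some mx := by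
    cases hm : PySem.List.max? A (fun x => x) with
    | none => exact absurd ((PySem.List.max?_eq_none_iff A _).mp hm) h
    | some m => exact ⟨m, rfl⟩
  unfold findClosetMinMax findClosetMinMax_alt
  rw [hmn, hmx]
  simp only []
  by_cases heq : mn = mx
  · simp [heq]
  · simp only [if_neg heq]
    set n : Int := (A.length : Int) with hn
    have henum_mem : ∀ p ∈ PySem.List.enumerate A 0,
        0 ≤ p.1 ∧ p.1 < n ∧ PySem.List.pyGetD A p.1 0 = p.2 := by
      intro p hp
      obtain ⟨h1, h2, h3⟩ := pvEnum_mem A 0 p hp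
      exact ⟨h1, by omega, by simpa using h3⟩
    have henum_sorted := pvEnum_sorted A 0
    apply le_antisymm
    · -- A's result ≤ B's result
      rcases pvFoldB_shape A mn mx (PySem.List.enumerate A 0) (n, none, none)
          henum_mem henum_sorted (by intro q hq; simp at hq) (by intro q hq; simp at hq) with
        hB | ⟨i, j, hi0, hij, hjn, hpair, hw⟩
      · rw [hB]; exact pvFoldA_le A mn mx n _ n
      · rw [hw]; exact pvFoldA_le_pair A mn mx heq i j hi0 hij hjn hpair n
    · -- B's result ≤ A's result
      rcases pvFoldA_shape A mn mx n.toNat 0 n (le_refl 0) (by omega) with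
        hA | ⟨i, j, hi0, hij, hjn, hpair, hw⟩
      · rw [hA]; exact pvFoldB_le mn mx _ _
      · rw [hw]
        have hmemA : ∀ p ∈ PySem.List.enumerate A 0, PySem.List.pyGetD A p.1 0 = p.2 :=
          fun p hp => (henum_mem p hp).2.2
        rcases hpair with ⟨hiv, hjv⟩ | ⟨hiv, hjv⟩
        · have hjl : (j, mx) ∈ PySem.List.enumerate A 0 := by
            have := pvEnum_mem_of A 0 j (by omega) (by omega)
            simpa [hjv] using this
          have hil : (i, mn) ∈ PySem.List.enumerate A 0 := by
            have := pvEnum_mem_of A 0 i hi0 (by omega)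
            simpa [hiv] using this
          exact pvFoldB_le_mnmx A mn mx heq i j hij hiv hjv
            (PySem.List.enumerate A 0) (n, none, none) hmemA henum_sorted hjl (Or.inl hil)
        · have hjl : (j, mn) ∈ PySem.List.enumerate A 0 := by
            have := pvEnum_mem_of A 0 j (by omega) (by omega)
            simpa [hjv] using this
          have hil : (i, mx) ∈ PySem.List.enumerate A 0 := by
            have := pvEnum_mem_of A 0 i hi0 (by omega)
            simpa [hiv] using this
          exact pvFoldB_le_mxmn A mn mx heq i j hij hiv hjv
            (PySem.List.enumerate A 0) (n, none, none) hmemA henum_sorted hjl (Or.inl hil)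

-- ===== VERDICT (by name: the statement is the Claim_ definition above) =====
theorem findClosetMinMax_spec : Claim_equal_findClosetMinMax := by
  intro A _ hpre
  unfold Spec_findClosetMinMax
  exact pvMain A hpre
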